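-- pv_equiv track=rewrite | github.com/1gnaci0/continuous-resource-allocation | functions_phone.py | smin_smax
-- ===== SOURCE A (Python) =====
-- def interaction_is_in_day(seconds, day=1):
--     if day == 1:
--         interval = [0,86420]
--     elif day == 2:
--         interval = [86420, 86400*2]
--     elif day == 3:
--         interval = [86400*2,86420*3]
--     else:
--         return 'invalid day'
--     return (seconds >= interval[0]) and (seconds <= interval[1])
--
-- def total_interaction_per_day(data,day=1):
--     new = {ego:[] for ego in data}
--     for ego in data:
--         temp = []
--         for alter in data[ego].keys():
--             values = [list_[1] - list_[0] for list_ in data[ego][alter] if interaction_is_in_day(list_[0],day)]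
--             suma = sum(values)
--             if suma != 0:
--                 temp.append(suma)
--         new[ego] += temp
--         if len(new[ego]) == 0:
--             new[ego] = [0]
--     return new
--
-- def smin_smax(data):
--     dic = {ego:() for ego in data}
--     for ego in data:
--         interactions_day_1 = total_interaction_per_day(data,day=1)[ego]
--         interactions_day_2 = total_interaction_per_day(data,day=2)[ego]
--         interactions_day_3 = total_interaction_per_day(data,day=3)[ego]
--
--         smin = min(interactions_day_1) + min(interactions_day_2) + min(interactions_day_3)
--         smax = max(interactions_day_1) + max(interactions_day_2) + max(interactions_day_3)
--         dic[ego] = (smin,smax)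
--     return dic
-- ===== SOURCE B (Python) =====
-- def smin_smax(data):
--     out = {}
--     for ego, alters in data.items():
--         d1, d2, d3 = [], [], []
--         for interactions in alters.values():
--             s1 = s2 = s3 = 0
--             for rec in interactions:
--                 start = rec[0]
--                 if 0 <= start <= 86420:
--                     s1 += rec[1] - start
--                 if 86420 <= start <= 172800:
--                     s2 += rec[1] - start
--                 if 172800 <= start <= 259260:
--                     s3 += rec[1] - start
--             if s1 != 0:
--                 d1.append(s1)
--             if s2 != 0:
--                 d2.append(s2)
--             if s3 != 0:
--                 d3.append(s3)
--         d1 = d1 or [0]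
--         d2 = d2 or [0]
--         d3 = d3 or [0]
--         out[ego] = (min(d1) + min(d2) + min(d3), max(d1) + max(d2) + max(d3))
--     return out
-- ===== Notes on version B (the rewrite author's own statement) =====
-- stated objective: faster
-- what changed: B makes a single pass over the data, accumulating all three day sums per alter in one scan, instead of rebuilding the complete per-day totals dictionary for the whole dataset three times for every ego as A does via total_interaction_per_day.
import Mathlib
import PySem

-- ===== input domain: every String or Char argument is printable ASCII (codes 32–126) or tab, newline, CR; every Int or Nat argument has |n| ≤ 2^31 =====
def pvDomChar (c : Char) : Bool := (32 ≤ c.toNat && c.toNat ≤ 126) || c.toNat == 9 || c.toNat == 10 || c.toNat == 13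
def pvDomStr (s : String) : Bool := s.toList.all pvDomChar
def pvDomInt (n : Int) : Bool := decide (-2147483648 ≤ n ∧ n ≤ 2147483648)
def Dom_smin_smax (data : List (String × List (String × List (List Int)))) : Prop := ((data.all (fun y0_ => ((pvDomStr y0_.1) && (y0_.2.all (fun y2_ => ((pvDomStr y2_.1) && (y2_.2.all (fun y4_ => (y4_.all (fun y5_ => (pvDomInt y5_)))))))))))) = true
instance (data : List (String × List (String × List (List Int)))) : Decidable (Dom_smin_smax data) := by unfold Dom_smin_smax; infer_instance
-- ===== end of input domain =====

-- B replaces A's per-ego recomputation of the whole per-day totals dictionary (three full passes over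
-- all data for every ego) by a single pass that accumulates all three day sums per alter in one scan.
-- dicts are modelled as association lists; Pre_ restricts to unique keys and to interaction records
-- on which Python's subscripting does not raise.

-- ===== PORT A =====
-- Python returns the truthy string 'invalid day' for day ∉ {1,2,3}; unreachable from smin_smax
-- (which only passes day = 1, 2, 3), ported as true.  The two-element interval list is inlined.
def interaction_is_in_day (seconds : Int) (day : Int) : Bool :=
  if day = 1 then decide (seconds ≥ 0) && decide (seconds ≤ 86420)
  else if day = 2 then decide (seconds ≥ 86420) && decide (seconds ≤ 86400*2)
  else if day = 3 then decide (seconds ≥ 86400*2) && decide (seconds ≤ 86420*3)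
  else true

-- dict comprehension {ego: [] for ego in data} ported as an insert fold; data[ego] / data[ego][alter]
-- lookups are the fold element's own component (equal under Pre_'s unique keys).  Out-of-range
-- subscripts l[0] / l[1] use .getD 0 where Python raises IndexError; Pre_ excludes those inputs.
def total_interaction_per_day (data : List (String × List (String × List (List Int)))) (day : Int) :
    PySem.Dict String (List Int) :=
  data.foldl
    (fun new p =>
      let temp := p.2.foldl
        (fun temp alter =>
          let values := (alter.2.filter
              (fun l => interaction_is_in_day ((PySem.List.pyGet? l 0).getD 0) day)).map
            (fun l => (PySem.List.pyGet? l 1).getD 0 - (PySem.List.pyGet? l 0).getD 0)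
          let suma := values.sum
          if suma ≠ 0 then temp ++ [suma] else temp) []
      let new := new.insert p.1 (new.getD p.1 [] ++ temp)
      if (new.getD p.1 []).length = 0 then new.insert p.1 [0] else new)
    (data.foldl (fun d p => d.insert p.1 ([] : List Int)) PySem.Dict.empty)

-- dic = {ego: () for ego in data}: the empty-tuple placeholder has no Int × Int value; (0, 0) stands
-- in for it and is overwritten for every key before the dict is returned.  min/max of a nonempty
-- list; the [0] default makes the lists nonempty, .getD 0 is never used.
def smin_smax (data : List (String × List (String × List (List Int)))) : List (String × Int × Int) :=
  (data.foldl
    (fun dic p =>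
      let interactions_day_1 := (total_interaction_per_day data 1).getD p.1 []
      let interactions_day_2 := (total_interaction_per_day data 2).getD p.1 []
      let interactions_day_3 := (total_interaction_per_day data 3).getD p.1 []
      let smin := (PySem.List.min? interactions_day_1 (fun x => x)).getD 0 +
                  (PySem.List.min? interactions_day_2 (fun x => x)).getD 0 +
                  (PySem.List.min? interactions_day_3 (fun x => x)).getD 0
      let smax := (PySem.List.max? interactions_day_1 (fun x => x)).getD 0 +
                  (PySem.List.max? interactions_day_2 (fun x => x)).getD 0 +
                  (PySem.List.max? interactions_day_3 (fun x => x)).getD 0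
      dic.insert p.1 (smin, smax))
    (data.foldl (fun d p => d.insert p.1 (((0:Int), (0:Int)))) PySem.Dict.empty)).items

-- ===== PORT B =====
def smin_smax_alt (data : List (String × List (String × List (List Int)))) : List (String × Int × Int) :=
  data.map (fun p =>
    let ds := p.2.foldl
      (fun acc alter =>
        let s := alter.2.foldl
          (fun s rec =>
            let start := (PySem.List.pyGet? rec 0).getD 0
            (s.1 + (if 0 ≤ start ∧ start ≤ 86420 then (PySem.List.pyGet? rec 1).getD 0 - start else 0),
             s.2.1 + (if 86420 ≤ start ∧ start ≤ 172800 then (PySem.List.pyGet? rec 1).getD 0 - start else 0),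
             s.2.2 + (if 172800 ≤ start ∧ start ≤ 259260 then (PySem.List.pyGet? rec 1).getD 0 - start else 0)))
          ((0:Int), (0:Int), (0:Int))
        ((if s.1 ≠ 0 then acc.1 ++ [s.1] else acc.1),
         (if s.2.1 ≠ 0 then acc.2.1 ++ [s.2.1] else acc.2.1),
         (if s.2.2 ≠ 0 then acc.2.2 ++ [s.2.2] else acc.2.2)))
      (([] : List Int), ([] : List Int), ([] : List Int))
    let d1 := if ds.1 = [] then [0] else ds.1
    let d2 := if ds.2.1 = [] then [0] else ds.2.1
    let d3 := if ds.2.2 = [] then [0] else ds.2.2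
    (p.1,
     (PySem.List.min? d1 (fun x => x)).getD 0 + (PySem.List.min? d2 (fun x => x)).getD 0 +
       (PySem.List.min? d3 (fun x => x)).getD 0,
     (PySem.List.max? d1 (fun x => x)).getD 0 + (PySem.List.max? d2 (fun x => x)).getD 0 +
       (PySem.List.max? d3 (fun x => x)).getD 0))

-- ===== PRECONDITION & SPEC =====
-- Pre_ excludes (a) association lists with duplicate ego or duplicate alter keys, which have no
-- faithful dict counterpart (Python's dict keeps the last value, an accidental corner), and
-- (b) interaction records on which Python raises IndexError: records shorter than 2 entries,
-- except length-1 records whose start lies outside every day interval (A filters those out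
-- before subscripting and returns normally; so do both ports).
def Pre_smin_smax (data : List (String × List (String × List (List Int)))) : Prop :=
  (data.map Prod.fst).Nodup ∧
  ∀ p ∈ data, (p.2.map Prod.fst).Nodup ∧
    ∀ q ∈ p.2, ∀ l ∈ q.2, 2 ≤ l.length ∨ (l.length = 1 ∧ ∀ x ∈ l, x < 0 ∨ 259260 < x)
instance (data : List (String × List (String × List (List Int)))) : Decidable (Pre_smin_smax data) := by
  unfold Pre_smin_smax; infer_instance

def pvWitness_smin_smax : (List (String × List (String × List (List Int)))) :=
  [("ego1", [("alter1", [[0, 10], [86420, 86430]]), ("alter2", [])]), ("ego2", [])]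

def Spec_smin_smax (data : List (String × List (String × List (List Int)))) (out : List (String × Int × Int)) : Prop := out = smin_smax_alt data
instance (data : List (String × List (String × List (List Int)))) (out : List (String × Int × Int)) : Decidable (Spec_smin_smax data out) := by unfold Spec_smin_smax; infer_instance

-- ===== CLAIM (what is proved, stated in full; the proofs are below) =====
def Claim_equal_smin_smax : Prop := ∀ (data : List (String × List (String × List (List Int)))), Dom_smin_smax data → Pre_smin_smax data → Spec_smin_smax data (smin_smax data)


-- ===== LEMMAS AND PROOFS =====

-- ---- abbreviations for A's per-alter / per-ego values ----
def startOf (l : List Int) : Int := (PySem.List.pyGet? l 0).getD 0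
def durOf (l : List Int) : Int := (PySem.List.pyGet? l 1).getD 0 - (PySem.List.pyGet? l 0).getD 0
def aSum (day : Int) (ls : List (List Int)) : Int :=
  ((ls.filter (fun l => interaction_is_in_day (startOf l) day)).map durOf).sum
def aTemp (day : Int) (alters : List (String × List (List Int))) : List Int :=
  alters.foldl (fun t al => if aSum day al.2 ≠ 0 then t ++ [aSum day al.2] else t) []
def aDay (day : Int) (alters : List (String × List (List Int))) : List Int :=
  if aTemp day alters = [] then [0] else aTemp day alters

-- ---- dict plumbing ----
lemma nodup_keys_of_items {ν : Type} (d : PySem.Dict String ν) (done rest : List (String × ν))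
    (k : String) (w : ν) (hnd : (done.map Prod.fst ++ k :: rest.map Prod.fst).Nodup)
    (hitems : d.items = done ++ (k, w) :: rest) : d.keys.Nodup := by
  have : d.keys = done.map Prod.fst ++ k :: rest.map Prod.fst := by
    simp [PySem.Dict.keys, hitems]
  rw [this]; exact hnd

lemma map_update_key {ν : Type} (done rest : List (String × ν)) (k : String) (w v : ν)
    (hd : k ∉ done.map Prod.fst) (hr : k ∉ rest.map Prod.fst) :
    (done ++ (k, w) :: rest).map (fun q => if q.1 == k then (k, v) else q) = done ++ (k, v) :: rest := by
  have hid : ∀ (l : List (String × ν)), k ∉ l.map Prod.fst →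
      l.map (fun q => if q.1 == k then (k, v) else q) = l := by
    intro l hl
    conv_rhs => rw [← List.map_id l]
    refine List.map_congr_left (fun q hq => ?_)
    have : q.1 ≠ k := fun h => hl (h ▸ List.mem_map_of_mem hq)
    simp [this]
  rw [List.map_append, List.map_cons, hid done hd, hid rest hr]
  simp

lemma insert_mid {ν : Type} (d : PySem.Dict String ν) (done rest : List (String × ν)) (k : String)
    (w v : ν) (hd : k ∉ done.map Prod.fst) (hr : k ∉ rest.map Prod.fst)
    (hitems : d.items = done ++ (k, w) :: rest) :
    (d.insert k v).items = done ++ (k, v) :: rest := by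
  have hc : d.contains k = true := by
    rw [PySem.Dict.contains_iff_mem_keys]
    simp [PySem.Dict.keys, hitems]
  rw [PySem.Dict.items_insert_of_contains d v hc, hitems, map_update_key done rest k w v hd hr]

lemma getD_mid {ν : Type} (d : PySem.Dict String ν) (done rest : List (String × ν)) (k : String)
    (w dflt : ν) (hnd : (done.map Prod.fst ++ k :: rest.map Prod.fst).Nodup)
    (hitems : d.items = done ++ (k, w) :: rest) :
    d.getD k dflt = w := by
  refine PySem.Dict.getD_of_mem_items d ?_ (nodup_keys_of_items d done rest k w hnd hitems) dflt
  rw [hitems]; simp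

lemma nodup_split {ν : Type} (done rest : List (String × ν)) (k : String)
    (hnd : (done.map Prod.fst ++ k :: rest.map Prod.fst).Nodup) :
    k ∉ done.map Prod.fst ∧ k ∉ rest.map Prod.fst := by
  have h1 : (k :: rest.map Prod.fst).Nodup := hnd.sublist (List.sublist_append_right _ _)
  have h2 := List.disjoint_of_nodup_append hnd
  exact ⟨fun h => h2 h List.mem_cons_self, (List.nodup_cons.1 h1).1⟩

lemma dict_fold_items {α ν : Type} (step : PySem.Dict String ν → (String × α) → PySem.Dict String ν)
    (ph val : String × α → ν)
    (hstep : ∀ (d : PySem.Dict String ν) (done rest : List (String × ν)) (p : String × α),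
      (done.map Prod.fst ++ p.1 :: rest.map Prod.fst).Nodup →
      d.items = done ++ (p.1, ph p) :: rest →
      (step d p).items = done ++ (p.1, val p) :: rest) :
    ∀ (l : List (String × α)) (done : List (String × ν)) (d : PySem.Dict String ν),
      (done.map Prod.fst ++ l.map Prod.fst).Nodup →
      d.items = done ++ l.map (fun p => (p.1, ph p)) →
      (l.foldl step d).items = done ++ l.map (fun p => (p.1, val p)) := by
  intro l
  induction l with
  | nil => intro done d _ h; simpa using h
  | cons p l ih =>
    intro done d hnd hitems
    have hnd' : (done.map Prod.fst ++ p.1 :: (l.map (fun p => (p.1, ph p))).map Prod.fst).Nodup := by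
      simpa [Function.comp] using hnd
    have h1 : (step d p).items = done ++ (p.1, val p) :: l.map (fun q => (q.1, ph q)) := by
      refine hstep d done (l.map (fun q => (q.1, ph q))) p ?_ ?_
      · simpa [Function.comp] using hnd
      · simpa using hitems
    have h2 := ih (done ++ [(p.1, val p)]) (step d p) ?_ ?_
    · simpa using h2
    · simpa [Function.comp, List.append_assoc] using hnd
    · simpa using h1

lemma init_items {ν : Type} (data : List (String × List (String × List (List Int)))) (v0 : ν)
    (h : (data.map Prod.fst).Nodup) :
    (data.foldl (fun d p => d.insert p.1 v0) PySem.Dict.empty).items =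
      data.map (fun p => (p.1, v0)) := by
  rw [PySem.Dict.items_foldl_insert_fresh data Prod.fst (fun _ => v0) PySem.Dict.empty
    (fun a _ => PySem.Dict.contains_empty a.1) h]
  rfl

lemma aTemp_eq (day : Int) (alters : List (String × List (List Int))) :
    alters.foldl (fun temp alter =>
      if ((alter.2.filter (fun l => interaction_is_in_day ((PySem.List.pyGet? l 0).getD 0) day)).map
            (fun l => (PySem.List.pyGet? l 1).getD 0 - (PySem.List.pyGet? l 0).getD 0)).sum ≠ 0 then
        temp ++ [((alter.2.filter (fun l => interaction_is_in_day ((PySem.List.pyGet? l 0).getD 0) day)).map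
            (fun l => (PySem.List.pyGet? l 1).getD 0 - (PySem.List.pyGet? l 0).getD 0)).sum]
      else temp) [] = aTemp day alters := rfl

-- ---- A's two folds, characterised ----
lemma tipd_items (data : List (String × List (String × List (List Int)))) (day : Int)
    (h : (data.map Prod.fst).Nodup) :
    (total_interaction_per_day data day).items = data.map (fun p => (p.1, aDay day p.2)) := by
  unfold total_interaction_per_day
  refine dict_fold_items _ (fun _ => ([] : List Int)) (fun p => aDay day p.2) ?_ data [] _
    (by simpa using h) (by simpa using init_items data ([] : List Int) h)
  intro d done rest p hnd hitems
  obtain ⟨hd1, hr1⟩ := nodup_split done rest p.1 hnd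
  have hget : d.getD p.1 [] = [] := getD_mid d done rest p.1 [] [] hnd hitems
  dsimp only
  rw [aTemp_eq, hget, List.nil_append]
  have hins := insert_mid d done rest p.1 [] (aTemp day p.2) hd1 hr1 hitems
  have hget2 : (d.insert p.1 (aTemp day p.2)).getD p.1 [] = aTemp day p.2 :=
    getD_mid _ done rest p.1 (aTemp day p.2) [] hnd hins
  rw [hget2]
  by_cases hT : aTemp day p.2 = []
  · rw [if_pos (by simp [hT]),
      insert_mid (d.insert p.1 (aTemp day p.2)) done rest p.1 (aTemp day p.2) [0] hd1 hr1 hins,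
      aDay, if_pos hT]
  · rw [if_neg (by simpa [List.length_eq_zero_iff] using hT), hins, aDay, if_neg hT]

def egoValA (data : List (String × List (String × List (List Int))))
    (p : String × List (String × List (List Int))) : Int × Int :=
  ((PySem.List.min? ((total_interaction_per_day data 1).getD p.1 []) (fun x => x)).getD 0 +
     (PySem.List.min? ((total_interaction_per_day data 2).getD p.1 []) (fun x => x)).getD 0 +
     (PySem.List.min? ((total_interaction_per_day data 3).getD p.1 []) (fun x => x)).getD 0,
   (PySem.List.max? ((total_interaction_per_day data 1).getD p.1 []) (fun x => x)).getD 0 +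
     (PySem.List.max? ((total_interaction_per_day data 2).getD p.1 []) (fun x => x)).getD 0 +
     (PySem.List.max? ((total_interaction_per_day data 3).getD p.1 []) (fun x => x)).getD 0)

lemma sminA_items (data : List (String × List (String × List (List Int))))
    (h : (data.map Prod.fst).Nodup) :
    smin_smax data = data.map (fun p => (p.1, egoValA data p)) := by
  unfold smin_smax
  refine dict_fold_items _ (fun _ => ((0 : Int), (0 : Int))) (fun p => egoValA data p) ?_ data [] _
    (by simpa using h) (by simpa using init_items data ((0 : Int), (0 : Int)) h)
  intro d done rest p hnd hitems
  obtain ⟨hd1, hr1⟩ := nodup_split done rest p.1 hnd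
  exact insert_mid d done rest p.1 ((0 : Int), (0 : Int)) (egoValA data p) hd1 hr1 hitems

-- ---- day conditions ----
lemma day1_cond (s : Int) : interaction_is_in_day s 1 = decide (0 ≤ s ∧ s ≤ 86420) := by
  simp [interaction_is_in_day, ge_iff_le, Bool.decide_and]
lemma day2_cond (s : Int) : interaction_is_in_day s 2 = decide (86420 ≤ s ∧ s ≤ 172800) := by
  norm_num [interaction_is_in_day, ge_iff_le, Bool.decide_and]
lemma day3_cond (s : Int) : interaction_is_in_day s 3 = decide (172800 ≤ s ∧ s ≤ 259260) := by
  norm_num [interaction_is_in_day, ge_iff_le, Bool.decide_and]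

lemma aSum_cons (day : Int) (r : List Int) (recs : List (List Int)) :
    aSum day (r :: recs) =
      (if interaction_is_in_day (startOf r) day then durOf r else 0) + aSum day recs := by
  by_cases h : interaction_is_in_day (startOf r) day <;>
    simp [aSum, h]

-- ---- B's folds, characterised ----
lemma inner_fold (recs : List (List Int)) :
    ∀ (x y z : Int),
      recs.foldl
        (fun s rec =>
          let start := (PySem.List.pyGet? rec 0).getD 0
          (s.1 + (if 0 ≤ start ∧ start ≤ 86420 then (PySem.List.pyGet? rec 1).getD 0 - start else 0),
           s.2.1 + (if 86420 ≤ start ∧ start ≤ 172800 then (PySem.List.pyGet? rec 1).getD 0 - start else 0),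
           s.2.2 + (if 172800 ≤ start ∧ start ≤ 259260 then (PySem.List.pyGet? rec 1).getD 0 - start else 0)))
        (x, y, z) = (x + aSum 1 recs, y + aSum 2 recs, z + aSum 3 recs) := by
  induction recs with
  | nil => intro x y z; simp [aSum]
  | cons r recs ih =>
    intro x y z
    simp only [List.foldl_cons, ih, aSum_cons, day1_cond, day2_cond, day3_cond, startOf, durOf,
      decide_eq_true_eq]
    norm_num
    refine ⟨by omega, by omega, by omega⟩

lemma outer_fold (alters : List (String × List (List Int))) :
    ∀ (a b c : List Int),
      alters.foldl
        (fun acc alter =>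
          let s := alter.2.foldl
            (fun s rec =>
              let start := (PySem.List.pyGet? rec 0).getD 0
              (s.1 + (if 0 ≤ start ∧ start ≤ 86420 then (PySem.List.pyGet? rec 1).getD 0 - start else 0),
               s.2.1 + (if 86420 ≤ start ∧ start ≤ 172800 then (PySem.List.pyGet? rec 1).getD 0 - start else 0),
               s.2.2 + (if 172800 ≤ start ∧ start ≤ 259260 then (PySem.List.pyGet? rec 1).getD 0 - start else 0)))
            ((0:Int), (0:Int), (0:Int))
          ((if s.1 ≠ 0 then acc.1 ++ [s.1] else acc.1),
           (if s.2.1 ≠ 0 then acc.2.1 ++ [s.2.1] else acc.2.1),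
           (if s.2.2 ≠ 0 then acc.2.2 ++ [s.2.2] else acc.2.2)))
        (a, b, c) =
        (alters.foldl (fun t al => if aSum 1 al.2 ≠ 0 then t ++ [aSum 1 al.2] else t) a,
         alters.foldl (fun t al => if aSum 2 al.2 ≠ 0 then t ++ [aSum 2 al.2] else t) b,
         alters.foldl (fun t al => if aSum 3 al.2 ≠ 0 then t ++ [aSum 3 al.2] else t) c) := by
  induction alters with
  | nil => intro a b c; simp
  | cons al alters ih =>
    intro a b c
    simp only [List.foldl_cons, inner_fold al.2 0 0 0, zero_add]
    exact ih _ _ _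

lemma getD_tipd (data : List (String × List (String × List (List Int)))) (day : Int)
    (p : String × List (String × List (List Int))) (hp : p ∈ data)
    (h : (data.map Prod.fst).Nodup) :
    (total_interaction_per_day data day).getD p.1 [] = aDay day p.2 := by
  refine PySem.Dict.getD_of_mem_items _ ?_ ?_ []
  · rw [tipd_items data day h]
    exact List.mem_map_of_mem hp
  · have : (total_interaction_per_day data day).keys = data.map Prod.fst := by
      simp [PySem.Dict.keys, tipd_items data day h]
    rw [this]; exact h

lemma pointwise (data : List (String × List (String × List (List Int))))
    (p : String × List (String × List (List Int))) (hp : p ∈ data)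
    (h : (data.map Prod.fst).Nodup) :
    (p.1, egoValA data p) =
      (fun p => (p.1,
        (PySem.List.min? (if aTemp 1 p.2 = [] then [0] else aTemp 1 p.2) (fun x => x)).getD 0 +
          (PySem.List.min? (if aTemp 2 p.2 = [] then [0] else aTemp 2 p.2) (fun x => x)).getD 0 +
          (PySem.List.min? (if aTemp 3 p.2 = [] then [0] else aTemp 3 p.2) (fun x => x)).getD 0,
        (PySem.List.max? (if aTemp 1 p.2 = [] then [0] else aTemp 1 p.2) (fun x => x)).getD 0 +
          (PySem.List.max? (if aTemp 2 p.2 = [] then [0] else aTemp 2 p.2) (fun x => x)).getD 0 +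
          (PySem.List.max? (if aTemp 3 p.2 = [] then [0] else aTemp 3 p.2) (fun x => x)).getD 0)) p := by
  simp only [egoValA, getD_tipd data 1 p hp h, getD_tipd data 2 p hp h, getD_tipd data 3 p hp h,
    aDay]

lemma alt_eq (data : List (String × List (String × List (List Int)))) :
    smin_smax_alt data = data.map (fun p => (p.1,
        (PySem.List.min? (if aTemp 1 p.2 = [] then [0] else aTemp 1 p.2) (fun x => x)).getD 0 +
          (PySem.List.min? (if aTemp 2 p.2 = [] then [0] else aTemp 2 p.2) (fun x => x)).getD 0 +
          (PySem.List.min? (if aTemp 3 p.2 = [] then [0] else aTemp 3 p.2) (fun x => x)).getD 0,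
        (PySem.List.max? (if aTemp 1 p.2 = [] then [0] else aTemp 1 p.2) (fun x => x)).getD 0 +
          (PySem.List.max? (if aTemp 2 p.2 = [] then [0] else aTemp 2 p.2) (fun x => x)).getD 0 +
          (PySem.List.max? (if aTemp 3 p.2 = [] then [0] else aTemp 3 p.2) (fun x => x)).getD 0)) := by
  unfold smin_smax_alt
  refine List.map_congr_left (fun p _ => ?_)
  simp only [outer_fold p.2 [] [] [], aTemp]

-- ===== VERDICT (by name: the statement is the Claim_ definition above) =====
theorem smin_smax_spec : Claim_equal_smin_smax := by
  intro data _ hpre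
  unfold Spec_smin_smax
  rw [sminA_items data hpre.1, alt_eq]
  exact List.map_congr_left (fun p hp => pointwise data p hp hpre.1)
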